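-- pv_equiv track=rewrite | github.com/HaKaTaHan/- | LV.1/크레인 인형 뽑기.py | solution
-- ===== SOURCE A (Python) =====
-- def solution(board, moves):
--     answer = 0
--
--     n = len(board)
--
--     switch = []
--     baguni = []
--
--     for i in range(n):
--         temp = []
--         for j in range(n):
--             if board[j][i] != 0:
--                 temp.append(board[j][i])
--         switch.append(temp[::-1])
--
--     for i in moves:
--         if len(switch[i-1]) == 0:
--             continue
--
--         temp = switch[i-1].pop()
--
--         if len(baguni) == 0 :
--             baguni.append(temp)
--         elif temp == baguni[-1]:
--             baguni.pop()
--             answer = answer + 1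
--         elif temp != baguni[-1]:
--             baguni.append(temp)
--
--     return answer * 2
-- ===== SOURCE B (Python) =====
-- def solution(board, moves):
--     # Pointer-per-column re-implementation: no preprocessing pass building
--     # reversed per-column stacks; each column keeps the next row to inspect.
--     answer = 0
--     n = len(board)
--     ptrs = [0] * n
--     basket = []
--     for m in moves:
--         c = m - 1
--         r = ptrs[c]
--         while r < n and board[r][c] == 0:
--             r += 1
--         if r >= n:
--             ptrs[c] = r
--             continue
--         v = board[r][c]
--         ptrs[c] = r + 1
--         if basket and basket[-1] == v:
--             basket.pop()
--             answer += 1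
--         else:
--             basket.append(v)
--     return answer * 2
-- ===== Notes on version B (the rewrite author's own statement) =====
-- stated objective: alternative
-- what changed: Removed the O(n^2) preprocessing pass that materialises reversed per-column stacks; B keeps one integer pointer per column and, on each move, scans that column top-to-bottom from the pointer skipping zeros, so the board itself is the only data structure.
-- outside the precondition, e.g. on solution([[1, 2, 3], [4, 2, 6]], [0, 2]): A returns 2, B returns 0
import Mathlib
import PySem

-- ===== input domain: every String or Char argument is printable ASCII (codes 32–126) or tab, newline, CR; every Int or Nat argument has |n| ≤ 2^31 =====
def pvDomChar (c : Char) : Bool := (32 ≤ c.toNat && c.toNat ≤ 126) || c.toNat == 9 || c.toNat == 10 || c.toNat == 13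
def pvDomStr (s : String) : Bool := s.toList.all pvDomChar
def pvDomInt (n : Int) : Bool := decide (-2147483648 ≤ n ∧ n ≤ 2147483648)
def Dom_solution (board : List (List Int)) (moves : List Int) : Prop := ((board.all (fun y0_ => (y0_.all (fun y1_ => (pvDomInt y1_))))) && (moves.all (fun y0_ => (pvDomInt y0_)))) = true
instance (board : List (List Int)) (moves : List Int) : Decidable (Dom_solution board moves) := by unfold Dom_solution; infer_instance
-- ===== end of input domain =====

-- B replaces A's preprocessing pass (reversed per-column stacks) by a per-column row pointer
-- into the untouched board; equivalence is about the return value (A mutates nothing observable).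

-- ===== PORT A =====
-- loop body of A's 'for i in moves' (switch, baguni, answer are the mutated state)
def stepA (st : List (List Int) × List Int × Int) (i : Int) : List (List Int) × List Int × Int :=
  let switch := st.1
  let baguni := st.2.1
  let answer := st.2.2
  if (PySem.List.pyGetD switch (i - 1) []).length = 0 then st
  else
    let stack := PySem.List.pyGetD switch (i - 1) []
    -- switch[i-1].pop() on the (guarded nonempty) list: value = last element, list loses it
    let temp := PySem.List.pyGetD stack (-1) 0
    let switch' := PySem.List.pySetD switch (i - 1) stack.dropLast
    if baguni.length = 0 then (switch', baguni ++ [temp], answer)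
    else if temp = PySem.List.pyGetD baguni (-1) 0 then (switch', baguni.dropLast, answer + 1)
    else if temp ≠ PySem.List.pyGetD baguni (-1) 0 then (switch', baguni ++ [temp], answer)
    else (switch', baguni, answer)

def solution (board : List (List Int)) (moves : List Int) : Int :=
  let n : Int := board.length
  let switch : List (List Int) :=
    (PySem.List.pyRange 0 n).foldl (fun switch i =>
      let temp : List Int :=
        (PySem.List.pyRange 0 n).foldl (fun temp j =>
          if PySem.List.pyGetD (PySem.List.pyGetD board j []) i 0 ≠ 0 then
            temp ++ [PySem.List.pyGetD (PySem.List.pyGetD board j []) i 0]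
          else temp) []
      switch ++ [temp.reverse]) []   -- temp[::-1] is reverse (PySem.List.slice?_none_none_neg_one)
  (moves.foldl stepA (switch, ([] : List Int), (0 : Int))).2.2 * 2

-- ===== PORT B =====
-- the 'while r < n and board[r][c] == 0: r += 1' loop of B
def altScan (board : List (List Int)) (c : Int) (n : Int) (r : Int) : Int :=
  if _h : r < n then
    if PySem.List.pyGetD (PySem.List.pyGetD board r []) c 0 = 0 then altScan board c n (r + 1)
    else r
  else r
termination_by (n - r).toNat
decreasing_by omega

-- loop body of B's 'for m in moves' (ptrs, basket, answer are the mutated state)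
def stepB (board : List (List Int)) (n : Int) (st : List Int × List Int × Int) (m : Int) :
    List Int × List Int × Int :=
  let ptrs := st.1
  let basket := st.2.1
  let answer := st.2.2
  let c := m - 1
  let r := altScan board c n (PySem.List.pyGetD ptrs c 0)
  if n ≤ r then (PySem.List.pySetD ptrs c r, basket, answer)
  else
    let v := PySem.List.pyGetD (PySem.List.pyGetD board r []) c 0
    let ptrs' := PySem.List.pySetD ptrs c (r + 1)
    if basket ≠ [] ∧ PySem.List.pyGetD basket (-1) 0 = v then (ptrs', basket.dropLast, answer + 1)
    else (ptrs', basket ++ [v], answer)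

def solution_alt (board : List (List Int)) (moves : List Int) : Int :=
  (moves.foldl (stepB board (board.length : Int))
    (List.replicate board.length (0 : Int), ([] : List Int), (0 : Int))).2.2 * 2

-- ===== PRECONDITION & SPEC =====
-- Pre_ excludes (a) inputs where A raises IndexError: a row shorter than len(board), or a move m
-- outside [1-n, n] (switch[m-1]); and (b) boards with a row LONGER than len(board) combined with a
-- non-positive move, on which A still returns: there the wrapped move addresses column n-1 in A but
-- the row's true last column in B, two equally defensible readings of a malformed board (see cites).
def Pre_solution (board : List (List Int)) (moves : List Int) : Prop :=
  (∀ row ∈ board, board.length ≤ row.length) ∧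
  (∀ m ∈ moves, 1 - (board.length : Int) ≤ m ∧ m ≤ (board.length : Int)) ∧
  ((∃ m ∈ moves, m ≤ 0) → ∀ row ∈ board, row.length = board.length)
instance (board : List (List Int)) (moves : List Int) : Decidable (Pre_solution board moves) := by
  unfold Pre_solution; infer_instance
def pvWitness_solution : List (List Int) × List Int := ([[0, 3], [2, 5]], [1, 2, 1, 2])

def Spec_solution (board : List (List Int)) (moves : List Int) (out : Int) : Prop :=
  out = solution_alt board moves
instance (board : List (List Int)) (moves : List Int) (out : Int) : Decidable (Spec_solution board moves out) := by
  unfold Spec_solution; infer_instance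

-- ===== CLAIM (what is proved, stated in full; the proofs are below) =====
def Claim_equal_solution : Prop := ∀ (board : List (List Int)) (moves : List Int),
  Dom_solution board moves → Pre_solution board moves → Spec_solution board moves (solution board moves)

-- ===== LEMMAS AND PROOFS =====

-- resolved (non-negative) index of python index c into a length-n list
def rIdx (n : Nat) (c : Int) : Nat := if 0 ≤ c then c.toNat else (c + n).toNat

-- column k of the board, read top to bottom
def colN (board : List (List Int)) (k : Nat) : List Int := board.map (fun row => row.getD k 0)

-- the not-yet-taken dolls of column k when the next row to inspect is p (top first)
def stkN (board : List (List Int)) (k p : Nat) : List Int :=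
  ((colN board k).drop p).filter (fun v => decide (v ≠ 0))

-- the simulation invariant between A's switch and B's ptrs
def SimInv (board : List (List Int)) (sw : List (List Int)) (ptrs : List Int) : Prop :=
  sw.length = board.length ∧ ptrs.length = board.length ∧
  ∀ k, k < board.length → ∃ p, p ≤ board.length ∧
    ptrs.getD k 0 = (p : Int) ∧ sw.getD k [] = (stkN board k p).reverse

lemma rIdx_lt (n : Nat) (c : Int) (h1 : -(n : Int) ≤ c) (h2 : c < n) : rIdx n c < n := by
  unfold rIdx; split <;> omega

lemma pyGetD_rIdx {α : Type} (ys : List α) (c : Int) (d : α)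
    (h1 : -(ys.length : Int) ≤ c) (h2 : c < ys.length) :
    PySem.List.pyGetD ys c d = ys.getD (rIdx ys.length c) d := by
  unfold rIdx
  by_cases h : 0 ≤ c
  · rw [if_pos h, PySem.List.pyGetD_eq_getElem ys d h h2,
      List.getD_eq_getElem ys d (by omega)]
  · rw [if_neg h]
    have hc : c = -(((-c).toNat : Nat) : Int) := by omega
    rw [hc, PySem.List.pyGetD_neg_natCast ys (-c).toNat d (by omega) (by omega),
      List.getD_eq_getElem ys d (by omega)]
    congr 1
    omega

lemma pySetD_rIdx {α : Type} (ys : List α) (c : Int) (v : α)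
    (h1 : -(ys.length : Int) ≤ c) (h2 : c < ys.length) :
    PySem.List.pySetD ys c v = ys.set (rIdx ys.length c) v := by
  unfold rIdx
  by_cases h : 0 ≤ c
  · rw [if_pos h, PySem.List.pySetD_of_nonneg ys v h]
  · rw [if_neg h]
    unfold PySem.List.pySetD PySem.List.pySet? PySem.List.pyIdx?
    rw [if_neg (by omega), if_pos (by omega)]
    simp
    congr 1
    omega

lemma length_colN (board : List (List Int)) (k : Nat) : (colN board k).length = board.length := by
  simp [colN]

-- row[c] (python index) = row read at the resolved column, when the row is long enough and
-- either c is non-negative or the row has exactly n cells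
lemma pyGetD_row_ok (row : List Int) (n : Nat) (c : Int) (hge : n ≤ row.length)
    (hok : 0 ≤ c ∨ row.length = n) (h1 : -(n : Int) ≤ c) (h2 : c < n) :
    PySem.List.pyGetD row c 0 = row.getD (rIdx n c) 0 := by
  rcases hok with h | h
  · unfold rIdx
    rw [if_pos h, PySem.List.pyGetD_eq_getElem row 0 h (by exact_mod_cast lt_of_lt_of_le h2 (by exact_mod_cast hge)),
      List.getD_eq_getElem row 0 (by omega)]
  · subst h
    exact pyGetD_rIdx row c 0 h1 h2

-- board[r][c] (python indices) = column (rIdx c) read at row r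
lemma colv_sq (board : List (List Int)) (hge : ∀ row ∈ board, board.length ≤ row.length)
    (c' : Int) (hok : 0 ≤ c' ∨ ∀ row ∈ board, row.length = board.length)
    (h1 : -(board.length : Int) ≤ c') (h2 : c' < board.length)
    (r : Nat) (hr : r < board.length) :
    PySem.List.pyGetD (PySem.List.pyGetD board (r : Int) []) c' 0
      = (colN board (rIdx board.length c')).getD r 0 := by
  rw [PySem.List.pyGetD_natCast, List.getD_eq_getElem board [] hr,
    pyGetD_row_ok board[r] board.length c' (hge board[r] (List.getElem_mem hr))
      (hok.imp id (fun hs => hs board[r] (List.getElem_mem hr))) h1 h2]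
  rw [List.getD_eq_getElem (colN board _) 0 (by simpa [length_colN] using hr)]
  simp [colN]

-- A's inner loop builds the filtered column
lemma foldA_inner (board : List (List Int)) (i : Int) (L : List Int) (acc : List Int) :
    L.foldl (fun temp j =>
      if PySem.List.pyGetD (PySem.List.pyGetD board j []) i 0 ≠ 0 then
        temp ++ [PySem.List.pyGetD (PySem.List.pyGetD board j []) i 0]
      else temp) acc
    = acc ++ (L.map (fun j => PySem.List.pyGetD (PySem.List.pyGetD board j []) i 0)).filter
        (fun v => decide (v ≠ 0)) := by
  induction L generalizing acc with
  | nil => simp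
  | cons x xs ih =>
    simp only [List.foldl_cons, List.map_cons, List.filter_cons]
    by_cases h : PySem.List.pyGetD (PySem.List.pyGetD board x []) i 0 ≠ 0
    · rw [if_pos h, ih]; simp [h]
    · rw [if_neg h, ih]; simp [h]

-- the per-column range read is the column itself
lemma range_read_eq_colN (board : List (List Int)) (k : Nat) :
    (PySem.List.pyRange 0 (board.length : Int)).map
      (fun j => PySem.List.pyGetD (PySem.List.pyGetD board j []) (k : Int) 0)
    = colN board k := by
  have h := PySem.List.map_pyGetD_pyRange_zero' board []
  calc (PySem.List.pyRange 0 (board.length : Int)).map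
        (fun j => PySem.List.pyGetD (PySem.List.pyGetD board j []) (k : Int) 0)
      = ((PySem.List.pyRange 0 (board.length : Int)).map
          (fun j => PySem.List.pyGetD board j [])).map (fun row => PySem.List.pyGetD row (k : Int) 0) := by
        rw [List.map_map]; rfl
    _ = board.map (fun row => PySem.List.pyGetD row (k : Int) 0) := by rw [h]
    _ = colN board k := by simp [colN, PySem.List.pyGetD_natCast]

-- A's preprocessing loop: switch = per-column reversed filtered columns
lemma switch0_eq (board : List (List Int)) :
    ((PySem.List.pyRange 0 (board.length : Int)).foldl (fun switch i =>
      switch ++ [((PySem.List.pyRange 0 (board.length : Int)).foldl (fun temp j =>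
          if PySem.List.pyGetD (PySem.List.pyGetD board j []) i 0 ≠ 0 then
            temp ++ [PySem.List.pyGetD (PySem.List.pyGetD board j []) i 0]
          else temp) []).reverse]) [])
    = (List.range board.length).map (fun k => (stkN board k 0).reverse) := by
  have hb : ∀ (l : List Int) (acc : List (List Int)),
      l.foldl (fun switch i =>
        switch ++ [((PySem.List.pyRange 0 (board.length : Int)).foldl (fun temp j =>
            if PySem.List.pyGetD (PySem.List.pyGetD board j []) i 0 ≠ 0 then
              temp ++ [PySem.List.pyGetD (PySem.List.pyGetD board j []) i 0]
            else temp) []).reverse]) acc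
      = acc ++ l.map (fun i =>
          (((PySem.List.pyRange 0 (board.length : Int)).map
            (fun j => PySem.List.pyGetD (PySem.List.pyGetD board j []) i 0)).filter
              (fun v => decide (v ≠ 0))).reverse) := by
    intro l
    induction l with
    | nil => simp
    | cons x xs ih =>
      intro acc
      rw [List.foldl_cons, ih, foldA_inner]
      simp
  rw [hb, List.nil_append, PySem.List.pyRange_zero_natCast, List.map_map]
  apply List.map_congr_left
  intro k _
  simp only [Function.comp]
  rw [← PySem.List.pyRange_zero_natCast, range_read_eq_colN board k]
  simp [stkN]

-- specification of B's zero-skipping scan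
lemma altScan_spec (board : List (List Int)) (c : Int) :
    ∀ fuel p, p ≤ board.length → board.length - p ≤ fuel →
    ∃ q, p ≤ q ∧ q ≤ board.length ∧
      altScan board c (board.length : Int) (p : Int) = (q : Int) ∧
      (∀ j, p ≤ j → j < q →
        PySem.List.pyGetD (PySem.List.pyGetD board (j : Int) []) c 0 = 0) ∧
      (q < board.length →
        PySem.List.pyGetD (PySem.List.pyGetD board (q : Int) []) c 0 ≠ 0) := by
  intro fuel
  induction fuel with
  | zero =>
    intro p hp hf
    have : p = board.length := by omega
    subst this
    refine ⟨board.length, le_rfl, le_rfl, ?_, by omega, by omega⟩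
    rw [altScan]; simp
  | succ fuel ih =>
    intro p hp hf
    by_cases hlt : p < board.length
    · by_cases hz : PySem.List.pyGetD (PySem.List.pyGetD board (p : Int) []) c 0 = 0
      · obtain ⟨q, hq1, hq2, hq3, hq4, hq5⟩ := ih (p + 1) (by omega) (by omega)
        refine ⟨q, by omega, hq2, ?_, ?_, hq5⟩
        · rw [altScan]
          rw [dif_pos (by exact_mod_cast hlt), if_pos hz]
          rw [show ((p : Int) + 1) = ((p + 1 : Nat) : Int) by push_cast; ring]
          exact hq3
        · intro j hj1 hj2
          rcases Nat.eq_or_lt_of_le hj1 with h | h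
          · subst h; exact hz
          · exact hq4 j (by omega) hj2
      · refine ⟨p, le_rfl, hp, ?_, by omega, fun _ => hz⟩
        rw [altScan]
        rw [dif_pos (by exact_mod_cast hlt), if_neg hz]
    · have : p = board.length := by omega
      subst this
      refine ⟨board.length, le_rfl, le_rfl, ?_, by omega, by omega⟩
      rw [altScan]; simp

-- stkN drops a zero head
lemma stkN_succ_zero (board : List (List Int)) (k p : Nat) (hp : p < board.length)
    (hz : (colN board k).getD p 0 = 0) : stkN board k p = stkN board k (p + 1) := by
  have h' : p < (colN board k).length := by rw [length_colN]; exact hp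
  rw [List.getD_eq_getElem _ 0 h'] at hz
  unfold stkN
  rw [List.drop_eq_getElem_cons h', List.filter_cons, if_neg (by simp [hz])]

lemma stkN_succ_nonzero (board : List (List Int)) (k p : Nat) (hp : p < board.length)
    (hz : (colN board k).getD p 0 ≠ 0) :
    stkN board k p = (colN board k).getD p 0 :: stkN board k (p + 1) := by
  have h' : p < (colN board k).length := by rw [length_colN]; exact hp
  rw [List.getD_eq_getElem _ 0 h'] at hz ⊢
  unfold stkN
  rw [List.drop_eq_getElem_cons h', List.filter_cons, if_pos (by simp [hz])]

lemma stkN_len (board : List (List Int)) (k : Nat) : stkN board k board.length = [] := by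
  unfold stkN
  rw [List.drop_of_length_le (by rw [length_colN])]
  rfl

lemma getD_set_self {α : Type} (l : List α) (i : Nat) (v d : α) (h : i < l.length) :
    (l.set i v).getD i d = v := by
  simp [List.getD_eq_getElem?_getD, h]

lemma getD_set_ne {α : Type} (l : List α) (i j : Nat) (v d : α) (h : i ≠ j) :
    (l.set i v).getD j d = l.getD j d := by
  simp [List.getD_eq_getElem?_getD, List.getElem?_set_ne h]

-- the heart: one move preserves the invariant and keeps basket/answer equal
lemma step_eq (board : List (List Int)) (hge : ∀ row ∈ board, board.length ≤ row.length)
    (m : Int) (hok : 1 ≤ m ∨ ∀ row ∈ board, row.length = board.length)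
    (hm1 : 1 - (board.length : Int) ≤ m) (hm2 : m ≤ (board.length : Int))
    (sw : List (List Int)) (ptrs bk : List Int) (ans : Int) (hInv : SimInv board sw ptrs) :
    SimInv board (stepA (sw, bk, ans) m).1 (stepB board (board.length : Int) (ptrs, bk, ans) m).1 ∧
    (stepA (sw, bk, ans) m).2 = (stepB board (board.length : Int) (ptrs, bk, ans) m).2 := by
  obtain ⟨hswl, hptl, hcols⟩ := hInv
  set n := board.length with hn
  set c := m - 1 with hc
  have hc1 : -(n : Int) ≤ c := by omega
  have hc2 : c < (n : Int) := by omega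
  set k := rIdx n c with hk
  have hkn : k < n := rIdx_lt n c hc1 hc2
  obtain ⟨p, hpn, hptr, hswk⟩ := hcols k hkn
  obtain ⟨q, hq1, hq2, hq3, hq4, hq5⟩ := altScan_spec board c n p hpn (by omega)
  rw [← hn] at hq2 hq3 hq5
  -- the two reads resolve to index k
  have hswget : PySem.List.pyGetD sw c [] = (stkN board k p).reverse := by
    rw [pyGetD_rIdx sw c [] (by omega) (by exact_mod_cast (by omega : c < (sw.length : Int)))]
    rw [hswl]; exact hswk
  have hptget : PySem.List.pyGetD ptrs c 0 = (p : Int) := by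
    rw [pyGetD_rIdx ptrs c 0 (by omega) (by exact_mod_cast (by omega : c < (ptrs.length : Int)))]
    rw [hptl]; exact hptr
  -- stkN is preserved along the skipped zeros
  have hstk_pq : stkN board k p = stkN board k q := by
    clear hq3 hq5 hswget hptget hswk hptr
    induction q with
    | zero => have : p = 0 := by omega
              subst this; rfl
    | succ q ihq =>
      rcases Nat.eq_or_lt_of_le hq1 with h | h
      · rw [h]
      · have hzq : (colN board k).getD q 0 = 0 := by
          rw [← colv_sq board hge c (hok.imp (fun h => by omega) id) hc1 hc2 q (by omega)]
          exact hq4 q (by omega) (by omega)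
        rw [ihq (by omega) (by omega) (fun j a b => hq4 j a (by omega)),
          stkN_succ_zero board k q (by omega) hzq]
  by_cases hemp : q = n
  · -- empty column: A continues, B writes the pointer at n
    have hstk : stkN board k p = [] := by rw [hstk_pq, hemp]; exact stkN_len board k
    have hguard : (PySem.List.pyGetD sw c []).length = 0 := by rw [hswget, hstk]; rfl
    constructor
    · show SimInv board (stepA (sw, bk, ans) m).1 _
      unfold stepA stepB
      simp only [← hc, hptget, hq3, if_pos hguard]
      rw [if_pos (by omega : (n : Int) ≤ (q : Int))]
      rw [pySetD_rIdx ptrs c (q : Int) (by omega)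
        (by exact_mod_cast (by omega : c < (ptrs.length : Int))), hptl, ← hk]
      refine ⟨hswl, by simp [hptl, hn], ?_⟩
      intro k' hk'
      by_cases hkk : k' = k
      · subst hkk
        refine ⟨q, by omega, ?_, ?_⟩
        · rw [getD_set_self ptrs k _ 0 (by omega)]
        · rw [hswk, hstk_pq]
      · obtain ⟨p', h1, h2, h3⟩ := hcols k' (by omega)
        exact ⟨p', h1, by rw [getD_set_ne ptrs k k' _ 0 (fun hh => hkk hh.symm)]; exact h2, h3⟩
    · unfold stepA stepB
      simp only [← hc, hptget, hq3, if_pos hguard]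
      rw [if_pos (by omega : (n : Int) ≤ (q : Int))]
  · -- nonempty column: both take the same doll
    have hqn : q < n := by omega
    have hvq : (colN board k).getD q 0 ≠ 0 := by
      rw [← colv_sq board hge c (hok.imp (fun h => by omega) id) hc1 hc2 q hqn]; exact hq5 hqn
    set v := (colN board k).getD q 0 with hv
    have hstk : stkN board k p = v :: stkN board k (q + 1) := by
      rw [hstk_pq]; exact stkN_succ_nonzero board k q hqn hvq
    have hstack : PySem.List.pyGetD sw c [] = (stkN board k (q + 1)).reverse ++ [v] := by
      rw [hswget, hstk]; simp
    have hguard : ¬ (PySem.List.pyGetD sw c []).length = 0 := by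
      rw [hstack]; simp
    have htemp : PySem.List.pyGetD (PySem.List.pyGetD sw c []) (-1) 0 = v := by
      rw [hstack]; exact PySem.List.pyGetD_neg_one_append_singleton _ _ _
    have hdrop : (PySem.List.pyGetD sw c []).dropLast = (stkN board k (q + 1)).reverse := by
      rw [hstack]; simp
    have hvB : PySem.List.pyGetD (PySem.List.pyGetD board (q : Int) []) c 0 = v := by
      rw [colv_sq board hge c (hok.imp (fun h => by omega) id) hc1 hc2 q hqn]
    -- B's new pointer list and A's new switch
    have hInv' : SimInv board (PySem.List.pySetD sw c (PySem.List.pyGetD sw c []).dropLast)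
        (PySem.List.pySetD ptrs c ((q : Int) + 1)) := by
      rw [pySetD_rIdx sw c _ (by omega) (by exact_mod_cast (by omega : c < (sw.length : Int))),
        pySetD_rIdx ptrs c _ (by omega) (by exact_mod_cast (by omega : c < (ptrs.length : Int))),
        hswl, hptl, ← hk]
      refine ⟨by simp [hswl, hn], by simp [hptl, hn], ?_⟩
      intro k' hk'
      by_cases hkk : k' = k
      · subst hkk
        refine ⟨q + 1, by omega, ?_, ?_⟩
        · rw [getD_set_self ptrs k _ 0 (by omega)]
          push_cast
          ring
        · rw [getD_set_self sw k _ [] (by omega), hdrop]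
      · obtain ⟨p', h1, h2, h3⟩ := hcols k' (by omega)
        exact ⟨p', h1, by rw [getD_set_ne ptrs k k' _ 0 (fun hh => hkk hh.symm)]; exact h2,
               by rw [getD_set_ne sw k k' _ [] (fun hh => hkk hh.symm)]; exact h3⟩
    constructor
    · unfold stepA stepB
      simp only [← hc, hptget, hq3, if_neg hguard, htemp, hvB]
      rw [if_neg (by omega : ¬ ((n : Int) ≤ (q : Int)))]
      by_cases hb0 : bk.length = 0
      · have hbe : bk = [] := List.eq_nil_of_length_eq_zero hb0
        simp only [hbe]
        simpa using hInv'
      · have hbe : bk ≠ [] := by intro h; exact hb0 (by simp [h])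
        by_cases hvb : v = PySem.List.pyGetD bk (-1) 0
        · simp only [if_neg hb0, if_pos hvb]
          rw [if_pos ⟨hbe, hvb.symm⟩]
          exact hInv'
        · simp only [if_neg hb0, if_neg hvb, if_pos hvb]
          rw [if_neg (fun hh => hvb hh.2.symm)]
          exact hInv'
    · unfold stepA stepB
      simp only [← hc, hptget, hq3, if_neg hguard, htemp, hvB]
      rw [if_neg (by omega : ¬ ((n : Int) ≤ (q : Int)))]
      by_cases hb0 : bk.length = 0
      · have hbe : bk = [] := List.eq_nil_of_length_eq_zero hb0
        subst hbe
        simp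
      · have hbe : bk ≠ [] := by intro h; exact hb0 (by simp [h])
        by_cases hvb : v = PySem.List.pyGetD bk (-1) 0
        · simp only [if_neg hb0, if_pos hvb]
          rw [if_pos ⟨hbe, hvb.symm⟩]
        · simp only [if_neg hb0, if_neg hvb, if_pos hvb]
          rw [if_neg (fun hh => hvb hh.2.symm)]

-- folding over the moves preserves the simulation
lemma fold_eq (board : List (List Int)) (hge : ∀ row ∈ board, board.length ≤ row.length) :
    ∀ (moves : List Int),
    (∀ m ∈ moves, (1 - (board.length : Int) ≤ m ∧ m ≤ (board.length : Int)) ∧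
      (1 ≤ m ∨ ∀ row ∈ board, row.length = board.length)) →
    ∀ (sw : List (List Int)) (ptrs bk : List Int) (ans : Int), SimInv board sw ptrs →
    (moves.foldl stepA (sw, bk, ans)).2
      = (moves.foldl (stepB board (board.length : Int)) (ptrs, bk, ans)).2 := by
  intro moves
  induction moves with
  | nil => intro _ sw ptrs bk ans _; rfl
  | cons m ms ih =>
    intro hmv sw ptrs bk ans hInv
    obtain ⟨⟨hm1, hm2⟩, hok⟩ := hmv m (by simp)
    obtain ⟨hInv', heq⟩ := step_eq board hge m hok hm1 hm2 sw ptrs bk ans hInv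
    simp only [List.foldl_cons]
    have hA : stepA (sw, bk, ans) m
        = ((stepA (sw, bk, ans) m).1, (stepA (sw, bk, ans) m).2.1, (stepA (sw, bk, ans) m).2.2) := rfl
    have hB : stepB board (board.length : Int) (ptrs, bk, ans) m
        = ((stepB board (board.length : Int) (ptrs, bk, ans) m).1,
           (stepB board (board.length : Int) (ptrs, bk, ans) m).2.1,
           (stepB board (board.length : Int) (ptrs, bk, ans) m).2.2) := rfl
    rw [hA, hB, ← heq]
    exact ih (fun x hx => hmv x (by simp [hx])) _ _ _ _ hInv'

-- the initial states are related
lemma init_inv (board : List (List Int)) :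
    SimInv board ((List.range board.length).map (fun k => (stkN board k 0).reverse))
      (List.replicate board.length (0 : Int)) := by
  refine ⟨by simp, by simp, ?_⟩
  intro k hk
  refine ⟨0, by omega, ?_, ?_⟩
  · rw [List.getD_eq_getElem _ 0 (by simpa using hk)]; simp
  · rw [List.getD_eq_getElem _ [] (by simpa using hk)]; simp

-- ===== VERDICT (by name: the statement is the Claim_ definition above) =====
theorem solution_spec : Claim_equal_solution := by
  intro board moves _hdom hpre
  obtain ⟨hge, hmv, hmix⟩ := hpre
  unfold Spec_solution
  simp only [solution, solution_alt]
  rw [switch0_eq board]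
  rw [fold_eq board hge moves
    (fun m hm => ⟨hmv m hm, by
      by_cases h1 : 1 ≤ m
      · exact Or.inl h1
      · exact Or.inr (hmix ⟨m, hm, by omega⟩)⟩) _ _ [] 0 (init_inv board)]
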